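-- pv_equiv track=rewrite | github.com/hwanggu-corgi/algorithm-practice | Programmers/2_프렌즈4블록/main.py | refresh_board
-- ===== SOURCE A (Python) =====
-- def refresh_board(board, board_queues):
--     N_cols = len(board[0])
--     N_rows = len(board)
--     new_board = []
--
--     for i in range(N_rows):
--         row = []
--         for j in range(N_cols):
--             try:
--                 row.append(board_queues[j][i])
--             except IndexError:
--                 row.append("-")
--
--         new_board.append(row)
--     return new_board
-- ===== SOURCE B (Python) =====
-- def refresh_board(board, board_queues):
--     n_cols = len(board[0])
--     n_rows = len(board)
--     cols = []
--     for j in range(n_cols):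
--         q = board_queues[j] if j < len(board_queues) else []
--         col = list(q[:n_rows])
--         col += ["-"] * (n_rows - len(col))
--         cols.append(col)
--     if n_cols == 0:
--         return [[] for _ in range(n_rows)]
--     return [list(r) for r in zip(*cols)]
-- ===== Notes on version B (the rewrite author's own statement) =====
-- stated objective: alternative
-- what changed: B builds each column once (queue truncated to n_rows and padded with '-') and then transposes with zip, instead of A's per-cell try/except indexing row by row.
import Mathlib
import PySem

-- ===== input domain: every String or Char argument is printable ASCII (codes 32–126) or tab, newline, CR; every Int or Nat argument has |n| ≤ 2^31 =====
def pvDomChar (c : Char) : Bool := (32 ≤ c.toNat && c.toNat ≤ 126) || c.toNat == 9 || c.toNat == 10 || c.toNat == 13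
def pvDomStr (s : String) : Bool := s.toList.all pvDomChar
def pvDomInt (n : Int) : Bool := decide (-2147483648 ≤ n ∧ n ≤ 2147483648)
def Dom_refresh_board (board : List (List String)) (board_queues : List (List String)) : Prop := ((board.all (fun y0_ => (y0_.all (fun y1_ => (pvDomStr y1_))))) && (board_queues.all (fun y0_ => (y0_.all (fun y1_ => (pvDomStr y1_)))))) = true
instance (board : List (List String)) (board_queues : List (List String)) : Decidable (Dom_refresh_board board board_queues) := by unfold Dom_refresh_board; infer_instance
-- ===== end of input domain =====

-- B rebuilds each column once (queue truncated/padded with "-") and transposes with zip, instead of A's per-cell try/except probing; same cost, different decomposition.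

-- ===== PORT A =====
def refresh_board (board : List (List String)) (board_queues : List (List String)) : List (List String) :=
  (List.range board.length).map (fun (i : Nat) =>
    (List.range (board.headD []).length).map (fun (j : Nat) =>
      match PySem.List.pyGet? board_queues ((j : Nat) : Int) with
      | none => "-"
      | some q =>
        match PySem.List.pyGet? q ((i : Nat) : Int) with
        | none => "-"
        | some v => v))

-- ===== PORT B =====
-- zip(*cols): emit rows until the shortest column runs out (fuel = min column length)
def pvZipGo : Nat → List (List String) → List (List String)
  | 0, _ => []
  | Nat.succ n, cols => (cols.map (fun c => c.headD "-")) :: pvZipGo n (cols.map List.tail)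

def pvZipStar (cols : List (List String)) : List (List String) :=
  pvZipGo (((cols.map List.length).min?).getD 0) cols

def refresh_board_alt (board : List (List String)) (board_queues : List (List String)) : List (List String) :=
  let N_cols := (board.headD []).length
  let N_rows := board.length
  let cols := (List.range N_cols).map (fun (j : Nat) =>
    let q := if j < board_queues.length then board_queues.getD j [] else []
    let c := q.take N_rows
    c ++ List.replicate (N_rows - c.length) "-")
  if N_cols = 0 then (List.range N_rows).map (fun _ => ([] : List String))
  else pvZipStar cols

-- ===== PRECONDITION & SPEC =====
-- A raises IndexError on an empty board (board[0]); B raises there too. Nothing else is excluded.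
def Pre_refresh_board (board : List (List String)) (board_queues : List (List String)) : Prop := board ≠ []
instance (board : List (List String)) (board_queues : List (List String)) : Decidable (Pre_refresh_board board board_queues) := by unfold Pre_refresh_board; infer_instance
def pvWitness_refresh_board : List (List String) × List (List String) := ([["a", "b"], ["c", "d"]], [["x"]])

def Spec_refresh_board (board : List (List String)) (board_queues : List (List String)) (out : List (List String)) : Prop := out = refresh_board_alt board board_queues
instance (board : List (List String)) (board_queues : List (List String)) (out : List (List String)) : Decidable (Spec_refresh_board board board_queues out) := by unfold Spec_refresh_board; infer_instance

-- ===== CLAIM (what is proved, stated in full; the proofs are below) =====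
def Claim_equal_refresh_board : Prop := ∀ (board : List (List String)) (board_queues : List (List String)), Dom_refresh_board board board_queues → Pre_refresh_board board board_queues → Spec_refresh_board board board_queues (refresh_board board board_queues)

-- ===== LEMMAS AND PROOFS =====

theorem pvZipGo_eq_map (n : Nat) (cols : List (List String)) :
    pvZipGo n cols = (List.range n).map (fun i => cols.map (fun c => (getElem? c i).getD "-")) := by
  induction n generalizing cols with
  | zero => simp [pvZipGo]
  | succ n ih =>
    rw [pvZipGo, ih, List.range_succ_eq_map]
    simp only [List.map_cons, List.map_map]
    congr 1
    · apply List.map_congr_left; intro c _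
      cases c <;> simp
    · apply List.map_congr_left; intro i _
      simp only [Function.comp]
      apply List.map_congr_left; intro c _
      cases c <;> simp

theorem pv_foldl_min_replicate (k x : Nat) : List.foldl min x (List.replicate k x) = x := by
  induction k with
  | zero => rfl
  | succ n ih => simp [List.replicate_succ, ih]

theorem pv_min?_replicate_succ (m x : Nat) : (List.replicate (m + 1) x).min? = some x := by
  rw [List.replicate_succ, List.min?_cons', pv_foldl_min_replicate]

theorem refresh_board_spec : Claim_equal_refresh_board := by
  intro board board_queues _ hpre
  unfold Spec_refresh_board refresh_board refresh_board_alt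
  dsimp only
  by_cases h0 : (board.headD []).length = 0
  · rw [if_pos h0, h0]
    simp
  · rw [if_neg h0]
    have hRpos : 0 < board.length := by
      cases board with
      | nil => exact absurd rfl hpre
      | cons _ _ => simp
    -- every column of B has length board.length
    have hmapc : (((List.range (board.headD []).length).map (fun (j : Nat) =>
        let q := if j < board_queues.length then board_queues.getD j [] else []
        let c := q.take board.length
        c ++ List.replicate (board.length - c.length) "-")).map List.length)
        = List.replicate (board.headD []).length board.length := by
      rw [List.map_map]
      refine List.eq_replicate_iff.mpr ⟨by simp, ?_⟩
      intro b hb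
      simp only [List.mem_map, List.mem_range, Function.comp] at hb
      obtain ⟨j, _, rfl⟩ := hb
      simp only [List.length_append, List.length_take, List.length_replicate]
      omega
    have hmin : ((((List.range (board.headD []).length).map (fun (j : Nat) =>
        let q := if j < board_queues.length then board_queues.getD j [] else []
        let c := q.take board.length
        c ++ List.replicate (board.length - c.length) "-")).map List.length).min?).getD 0
        = board.length := by
      rw [hmapc]
      obtain ⟨m, hm⟩ := Nat.exists_eq_add_of_lt (Nat.pos_of_ne_zero h0)
      rw [show (board.headD []).length = m + 1 by omega, pv_min?_replicate_succ]
      rfl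
    rw [pvZipStar, hmin, pvZipGo_eq_map]
    apply List.map_congr_left
    intro i hi
    simp only [List.mem_range] at hi
    rw [List.map_map]
    apply List.map_congr_left
    intro j hj
    simp only [List.mem_range] at hj
    simp only [Function.comp]
    by_cases hjlt : j < board_queues.length
    · rw [if_pos hjlt]
      have hq : PySem.List.pyGet? board_queues ((j : Nat) : Int) = some (board_queues.getD j []) := by
        rw [PySem.List.pyGet?_natCast, List.getElem?_eq_getElem hjlt, List.getD_eq_getElem _ _ hjlt]
      rw [hq]
      dsimp only
      by_cases hiq : i < (board_queues.getD j []).length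
      · rw [PySem.List.pyGet?_natCast, List.getElem?_eq_getElem hiq]
        have hlt : i < ((board_queues.getD j []).take board.length).length := by
          simp only [List.length_take]; omega
        rw [List.getElem?_append_left hlt, List.getElem?_take_of_lt hi,
          List.getElem?_eq_getElem hiq]
        rfl
      · have hnone : PySem.List.pyGet? (board_queues.getD j []) ((i : Nat) : Int) = none := by
          rw [PySem.List.pyGet?_natCast, List.getElem?_eq_none_iff]; omega
        rw [hnone]
        dsimp only
        have hge : ((board_queues.getD j []).take board.length).length ≤ i := by
          simp only [List.length_take]; omega
        rw [List.getElem?_append_right hge]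
        have hrep : i - ((board_queues.getD j []).take board.length).length
            < board.length - ((board_queues.getD j []).take board.length).length := by
          simp only [List.length_take]; omega
        rw [List.getElem?_replicate_of_lt hrep]
        rfl
    · rw [if_neg hjlt]
      have hq : PySem.List.pyGet? board_queues ((j : Nat) : Int) = none := by
        rw [PySem.List.pyGet?_natCast, List.getElem?_eq_none_iff]; omega
      rw [hq]
      dsimp only
      simp [hi]
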